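-- pv_equiv track=rewrite | github.com/gauravgupta1556/ai-chef-project | app.py | calculate_missing
-- ===== SOURCE A (Python) =====
-- def calculate_missing(user_items, recipe_items):
--     user_set = set(x.strip().lower() for x in user_items)
--     missing = []
--     for r_item in recipe_items:
--         r_item_clean = r_item.lower()
--         if not any(u_item in r_item_clean for u_item in user_set):
--             missing.append(r_item)
--     return missing
-- ===== SOURCE B (Python) =====
-- def calculate_missing(user_items, recipe_items):
--     # Different algorithm: instead of scanning every user item against every
--     # recipe item, hash the cleaned user items and probe only the substrings
--     # of each recipe item whose length actually occurs among the patterns.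
--     pats = set(x.strip().lower() for x in user_items)
--     lengths = set(len(p) for p in pats)
--     missing = []
--     for r in recipe_items:
--         rc = r.lower()
--         n = len(rc)
--         if not any(rc[i:i + L] in pats
--                    for L in lengths
--                    for i in range(n - L + 1)):
--             missing.append(r)
--     return missing
-- ===== Notes on version B (the rewrite author's own statement) =====
-- stated objective: alternative
-- what changed: Instead of testing every cleaned user item as a substring of every recipe item, B hashes the cleaned user items into a set, collects the distinct pattern lengths, and for each recipe item probes only its substrings of those lengths against the hash set, so the inner scan over user items disappears.
import Mathlib
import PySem

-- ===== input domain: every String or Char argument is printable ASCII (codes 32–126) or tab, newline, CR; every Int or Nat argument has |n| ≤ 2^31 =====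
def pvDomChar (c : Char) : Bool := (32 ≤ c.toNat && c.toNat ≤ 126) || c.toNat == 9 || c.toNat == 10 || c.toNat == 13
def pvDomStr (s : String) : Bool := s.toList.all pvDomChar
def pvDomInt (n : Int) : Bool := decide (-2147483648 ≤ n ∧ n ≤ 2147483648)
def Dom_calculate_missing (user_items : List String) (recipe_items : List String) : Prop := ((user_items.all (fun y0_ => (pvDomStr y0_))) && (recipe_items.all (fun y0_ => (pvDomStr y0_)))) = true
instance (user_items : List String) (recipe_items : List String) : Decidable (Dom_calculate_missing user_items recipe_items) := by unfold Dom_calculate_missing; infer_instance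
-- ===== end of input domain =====

-- B replaces A's per-recipe scan over all user items by a hash set of cleaned user items
-- probed with the recipe item's substrings of the occurring pattern lengths (alternative
-- algorithm; equal return value proved below).

-- ===== PORT A =====
def calculate_missing (user_items : List String) (recipe_items : List String) : List String :=
  let user_set := PySem.Set.ofList (user_items.map (fun x => PySem.Str.lower (PySem.Str.strip x)))
  recipe_items.foldl (fun missing r_item =>
    let r_item_clean := PySem.Str.lower r_item
    if user_set.any (fun u_item => PySem.Str.isIn u_item r_item_clean) then missing
    else missing ++ [r_item]) []

-- ===== PORT B =====
def calculate_missing_alt (user_items : List String) (recipe_items : List String) : List String :=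
  let pats := PySem.Set.ofList (user_items.map (fun x => PySem.Str.lower (PySem.Str.strip x)))
  let lengths := PySem.Set.ofList (pats.map (fun p => PySem.Str.len p))
  recipe_items.foldl (fun missing r =>
    let rc := PySem.Str.lower r
    let n := PySem.Str.len rc
    if lengths.any (fun L => (PySem.List.pyRange 0 (n - L + 1) 1).any
        (fun i => pats.contains (PySem.Str.slice rc (some i) (some (i + L))))) then missing
    else missing ++ [r]) []

-- ===== PRECONDITION & SPEC =====
def Spec_calculate_missing (user_items : List String) (recipe_items : List String) (out : List String) : Prop := out = calculate_missing_alt user_items recipe_items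
instance (user_items : List String) (recipe_items : List String) (out : List String) : Decidable (Spec_calculate_missing user_items recipe_items out) := by unfold Spec_calculate_missing; infer_instance

-- ===== CLAIM (what is proved, stated in full; the proofs are below) =====
def Claim_equal_calculate_missing : Prop := ∀ (user_items : List String) (recipe_items : List String), Dom_calculate_missing user_items recipe_items → Spec_calculate_missing user_items recipe_items (calculate_missing user_items recipe_items)

-- ===== LEMMAS AND PROOFS =====

lemma mem_pyRange01 (m i : Int) : i ∈ PySem.List.pyRange 0 m 1 ↔ 0 ≤ i ∧ i < m := by
  unfold PySem.List.pyRange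
  simp only [if_neg (by norm_num : (1:Int) ≠ 0), List.mem_map, List.mem_range]
  constructor
  · rintro ⟨k, hk, rfl⟩
    split_ifs at hk <;> omega
  · rintro ⟨h0, hm⟩
    refine ⟨i.toNat, ?_, by omega⟩
    split_ifs with h <;> omega

-- A's per-item test (some cleaned user item occurs in the lowered recipe item) equals
-- B's per-item test (some substring of an occurring pattern length is in the pattern set).
lemma cond_eq (ps : List String) (rc : String) :
    (PySem.Set.ofList ps).any (fun u => PySem.Str.isIn u rc)
      = (PySem.Set.ofList ((PySem.Set.ofList ps).map (fun p => PySem.Str.len p))).any (fun L =>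
          (PySem.List.pyRange 0 (PySem.Str.len rc - L + 1) 1).any
            (fun i => (PySem.Set.ofList ps).contains (PySem.Str.slice rc (some i) (some (i + L))))) := by
  rw [Bool.eq_iff_iff]
  simp only [List.any_eq_true, PySem.Set.mem_ofList, PySem.Set.contains_iff, List.mem_map,
    mem_pyRange01]
  constructor
  · rintro ⟨u, hu, hin⟩
    rw [PySem.Str.isIn_eq, PySem.Chars.isIn_iff_infix] at hin
    obtain ⟨s, t, hst⟩ := hin
    have hlen : rc.toList.length = s.length + u.toList.length + t.length := by
      rw [← hst]; simp; omega
    refine ⟨PySem.Str.len u, ⟨u, hu, rfl⟩, (s.length : Int), ⟨by positivity, ?_⟩, ?_⟩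
    · rw [PySem.Str.len_eq, PySem.Str.len_eq]; omega
    · have hsl : PySem.Str.slice rc (some (s.length : Int))
          (some ((s.length : Int) + PySem.Str.len u)) = u := by
        rw [← String.toList_inj]
        rw [PySem.Str.toList_slice, PySem.Chars.slice_eq_listSlice, PySem.Str.len_eq]
        have : ((s.length : Int) + (u.toList.length : Int)) = ((s.length + u.toList.length : Nat) : Int) := by push_cast; ring
        rw [this, PySem.List.slice_natCast, ← hst, List.append_assoc, List.drop_left]
        have : s.length + u.toList.length - s.length = u.toList.length := by omega
        rw [this, List.take_left]
      rw [hsl]; exact hu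
  · rintro ⟨L, ⟨p, hp, rfl⟩, i, ⟨h0, hi⟩, hmem⟩
    refine ⟨_, hmem, ?_⟩
    rw [PySem.Str.isIn_eq, PySem.Chars.isIn_iff_infix]
    rw [PySem.Str.toList_slice, PySem.Chars.slice_eq_listSlice]
    have hL : (0:Int) ≤ PySem.Str.len p := by rw [PySem.Str.len_eq]; positivity
    rw [PySem.List.slice_toNat rc.toList h0 (by omega)]
    exact ((List.take_prefix _ _).isInfix).trans ((List.drop_suffix _ _).isInfix)

lemma foldl_eq (ps : List String) (rs : List String) (acc : List String) :
    rs.foldl (fun missing r_item =>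
      if (PySem.Set.ofList ps).any (fun u_item => PySem.Str.isIn u_item (PySem.Str.lower r_item)) then missing
      else missing ++ [r_item]) acc
    = rs.foldl (fun missing r =>
      if (PySem.Set.ofList ((PySem.Set.ofList ps).map (fun p => PySem.Str.len p))).any (fun L =>
          (PySem.List.pyRange 0 (PySem.Str.len (PySem.Str.lower r) - L + 1) 1).any
            (fun i => (PySem.Set.ofList ps).contains (PySem.Str.slice (PySem.Str.lower r) (some i) (some (i + L))))) then missing
      else missing ++ [r]) acc := by
  simp only [cond_eq]

-- ===== VERDICT (by name: the statement is the Claim_ definition above) =====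
theorem calculate_missing_spec : Claim_equal_calculate_missing := by
  intro user_items recipe_items _
  unfold Spec_calculate_missing calculate_missing calculate_missing_alt
  exact foldl_eq (user_items.map (fun x => PySem.Str.lower (PySem.Str.strip x))) recipe_items []
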